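-- pv_equiv track=rewrite | github.com/shradhaagarwal01/Data-Strructures-and-Algorithm | Data Structures/Two-pointers/Dam of Candies.py | maxCandy
-- ===== SOURCE A (Python) =====
-- def maxCandy(height, n):
--     # Your code goes here
--        maxcandy = 0
--        i = 0
--        j = len(height) - 1
--
--        while i < j:
--            maxcandy = max(maxcandy, min(height[i],height[j]) * (j-i-1) )
--            if height[i] > height[j]:
--                j -= 1
--            else:
--                i += 1
--        return maxcandy
-- ===== SOURCE B (Python) =====
-- def maxCandy(height, n):
--     # Exhaustive scan of all pairs (i, j), i < j; width factor is (j - i - 1).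
--     best = 0
--     for i in range(len(height)):
--         for j in range(i + 1, len(height)):
--             best = max(best, min(height[i], height[j]) * (j - i - 1))
--     return best
-- ===== Notes on version B (the rewrite author's own statement) =====
-- stated objective: simpler
-- what changed: Replaced the converging two-pointer loop by a plain brute-force scan over all index pairs, keeping the same width factor (j-i-1); correctness of A rests on a pruning argument that B does not need.
import Mathlib
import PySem

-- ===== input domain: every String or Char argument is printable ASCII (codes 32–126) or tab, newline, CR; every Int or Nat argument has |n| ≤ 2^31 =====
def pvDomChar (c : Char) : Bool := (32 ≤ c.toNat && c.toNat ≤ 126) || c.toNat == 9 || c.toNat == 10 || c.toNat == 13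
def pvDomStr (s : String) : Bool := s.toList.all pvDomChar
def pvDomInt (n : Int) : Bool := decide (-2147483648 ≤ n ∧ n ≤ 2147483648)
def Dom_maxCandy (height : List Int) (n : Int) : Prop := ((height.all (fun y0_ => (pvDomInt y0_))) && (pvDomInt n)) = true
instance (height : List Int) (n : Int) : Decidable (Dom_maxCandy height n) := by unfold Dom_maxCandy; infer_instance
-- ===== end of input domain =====

-- B replaces A's converging two-pointer scan by a plain brute-force maximum over all
-- index pairs (simpler, though quadratic); the return values are proved equal everywhere.

-- the scored quantity min(height[i], height[j]) * (j-i-1); indices are always in range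
-- whenever either port reads (i,j from the loops satisfy 0 ≤ i < j ≤ len-1), so the
-- default 0 of pyGetD is never used.
def candy (h : List Int) (i j : Int) : Int :=
  min (PySem.List.pyGetD h i 0) (PySem.List.pyGetD h j 0) * (j - i - 1)

-- ===== PORT A =====
-- while i < j: update maxcandy; move the pointer at the smaller bar
def loopA (h : List Int) (i j acc : Int) : Int :=
  if _hij : i < j then
    if PySem.List.pyGetD h i 0 > PySem.List.pyGetD h j 0 then
      loopA h i (j - 1) (max acc (candy h i j))
    else
      loopA h (i + 1) j (max acc (candy h i j))
  else acc
termination_by (j - i).toNat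
decreasing_by all_goals omega

def maxCandy (height : List Int) (n : Int) : Int :=
  loopA height 0 ((height.length : Int) - 1) 0

-- ===== PORT B =====
-- brute force: for i in range(len), for j in range(i+1, len): best = max(best, candy)
def maxCandy_alt (height : List Int) (n : Int) : Int :=
  (PySem.List.pyRange 0 (height.length : Int) 1).foldl
    (fun best i =>
      (PySem.List.pyRange (i + 1) (height.length : Int) 1).foldl
        (fun best j => max best (candy height i j)) best) 0

-- ===== PRECONDITION & SPEC =====
def Spec_maxCandy (height : List Int) (n : Int) (out : Int) : Prop := out = maxCandy_alt height n
instance (height : List Int) (n : Int) (out : Int) : Decidable (Spec_maxCandy height n out) := by unfold Spec_maxCandy; infer_instance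

-- ===== CLAIM (what is proved, stated in full; the proofs are below) =====
def Claim_equal_maxCandy : Prop := ∀ (height : List Int) (n : Int), Dom_maxCandy height n → Spec_maxCandy height n (maxCandy height n)

-- ===== LEMMAS AND PROOFS =====

-- generic fold-with-max facts ----------------------------------------------------

theorem foldl_init_le (Fo : Int → Int → Int) (hmono : ∀ a x, a ≤ Fo a x) :
    ∀ (l : List Int) (acc : Int), acc ≤ l.foldl Fo acc := by
  intro l
  induction l with
  | nil => intro acc; simp
  | cons y t ih => intro acc; exact le_trans (hmono acc y) (ih (Fo acc y))

theorem foldl_le (Fo : Int → Int → Int) (K : Int) (l : List Int)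
    (hbound : ∀ a x, a ≤ K → x ∈ l → Fo a x ≤ K) :
    ∀ acc, acc ≤ K → l.foldl Fo acc ≤ K := by
  induction l with
  | nil => intro acc hacc; simpa using hacc
  | cons y t ih =>
    intro acc hacc
    exact ih (fun a x ha hx => hbound a x ha (List.mem_cons_of_mem _ hx))
      (Fo acc y) (hbound acc y hacc (List.mem_cons_self))

theorem foldl_mem_le (Fo : Int → Int → Int) (hmono : ∀ a x, a ≤ Fo a x)
    (v : Int) (x : Int) :
    ∀ (l : List Int), x ∈ l → (∀ a, v ≤ Fo a x) → ∀ acc, v ≤ l.foldl Fo acc := by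
  intro l
  induction l with
  | nil => intro hx; simp at hx
  | cons y t ih =>
    intro hx hv acc
    rcases List.mem_cons.1 hx with rfl | hx'
    · exact le_trans (hv acc) (foldl_init_le Fo hmono t (Fo acc x))
    · exact ih hx' hv (Fo acc y)

-- pruning: the pairs a pointer move discards never beat max(0, candy i j) ---------

theorem candy_prune_left (h : List Int) (i q j : Int) (hiq : i < q) (hqj : q ≤ j)
    (hle : PySem.List.pyGetD h i 0 ≤ PySem.List.pyGetD h j 0) :
    candy h i q ≤ max 0 (candy h i j) := by
  unfold candy
  set a := PySem.List.pyGetD h i 0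
  set b := PySem.List.pyGetD h q 0
  set c := PySem.List.pyGetD h j 0
  rcases le_or_gt (min a b) 0 with hm | hm
  · exact le_trans (mul_nonpos_of_nonpos_of_nonneg hm (by omega)) (le_max_left _ _)
  · have ha : 0 < a := lt_of_lt_of_le hm (min_le_left _ _)
    have h1 : min a b * (q - i - 1) ≤ a * (j - i - 1) :=
      mul_le_mul (min_le_left _ _) (by omega) (by omega) (le_of_lt ha)
    have h2 : a * (j - i - 1) = min a c * (j - i - 1) := by rw [min_eq_left hle]
    exact le_trans h1 (h2 ▸ le_max_right 0 (min a c * (j - i - 1)))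

theorem candy_prune_right (h : List Int) (p i j : Int) (hip : i ≤ p) (hpj : p < j)
    (hlt : PySem.List.pyGetD h j 0 < PySem.List.pyGetD h i 0) :
    candy h p j ≤ max 0 (candy h i j) := by
  unfold candy
  set a := PySem.List.pyGetD h i 0
  set b := PySem.List.pyGetD h p 0
  set c := PySem.List.pyGetD h j 0
  rcases le_or_gt (min b c) 0 with hm | hm
  · exact le_trans (mul_nonpos_of_nonpos_of_nonneg hm (by omega)) (le_max_left _ _)
  · have hc : 0 < c := lt_of_lt_of_le hm (min_le_right _ _)
    have h1 : min b c * (j - p - 1) ≤ c * (j - i - 1) :=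
      mul_le_mul (min_le_right _ _) (by omega) (by omega) (le_of_lt hc)
    have h2 : c * (j - i - 1) = min a c * (j - i - 1) := by rw [min_eq_right (le_of_lt hlt)]
    exact le_trans h1 (h2 ▸ le_max_right 0 (min a c * (j - i - 1)))

-- A's loop: upper bound ----------------------------------------------------------

theorem loopA_le (h : List Int) (K : Int) :
    ∀ (i j acc : Int), acc ≤ K →
      (∀ p q, i ≤ p → p < q → q ≤ j → candy h p q ≤ K) →
      loopA h i j acc ≤ K := by
  intro i j acc
  induction i, j, acc using loopA.induct h with
  | case1 i j acc hij hgt ih =>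
    intro hacc hp
    rw [loopA]; simp only [hij, hgt, if_pos]
    exact ih (max_le hacc (hp i j le_rfl hij le_rfl))
      (fun p q h1 h2 h3 => hp p q h1 h2 (by omega))
  | case2 i j acc hij hgt ih =>
    intro hacc hp
    rw [loopA]; simp only [hij, hgt, if_false]
    exact ih (max_le hacc (hp i j le_rfl hij le_rfl))
      (fun p q h1 h2 h3 => hp p q (by omega) h2 h3)
  | case3 i j acc hij =>
    intro hacc _
    rw [loopA]; simp only [hij]; exact hacc

-- A's loop: lower bound (the two-pointer invariant) ------------------------------

theorem loopA_ge (h : List Int) :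
    ∀ (i j acc : Int), 0 ≤ acc →
      (∀ p q, 0 ≤ p → p < q → q ≤ (h.length : Int) - 1 → ¬(i ≤ p ∧ q ≤ j) →
        candy h p q ≤ acc) →
      0 ≤ loopA h i j acc ∧
        ∀ p q, 0 ≤ p → p < q → q ≤ (h.length : Int) - 1 → candy h p q ≤ loopA h i j acc := by
  intro i j acc
  induction i, j, acc using loopA.induct h with
  | case1 i j acc hij hgt ih =>
    intro hacc hout
    rw [loopA]; simp only [hij, hgt, if_pos]
    refine ih (le_trans hacc (le_max_left _ _)) ?_
    intro p q hp hpq hq hnot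
    by_cases hin : i ≤ p ∧ q ≤ j
    · -- discarded pairs end at q = j
      have hq_eq : q = j := by omega
      subst hq_eq
      have := candy_prune_right h p i q hin.1 hpq hgt
      have h0 : max 0 (candy h i q) ≤ max acc (candy h i q) := by
        exact max_le_max hacc le_rfl
      exact le_trans this h0
    · exact le_trans (hout p q hp hpq hq hin) (le_max_left _ _)
  | case2 i j acc hij hgt ih =>
    intro hacc hout
    rw [loopA]; simp only [hij, hgt, if_false]
    refine ih (le_trans hacc (le_max_left _ _)) ?_
    intro p q hp hpq hq hnot
    by_cases hin : i ≤ p ∧ q ≤ j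
    · -- discarded pairs start at p = i
      have hp_eq : p = i := by omega
      subst hp_eq
      have := candy_prune_left h p q j hpq hin.2 (by omega)
      have h0 : max 0 (candy h p j) ≤ max acc (candy h p j) := max_le_max hacc le_rfl
      exact le_trans this h0
    · exact le_trans (hout p q hp hpq hq hin) (le_max_left _ _)
  | case3 i j acc hij =>
    intro hacc hout
    rw [loopA]; simp only [hij]
    refine ⟨hacc, ?_⟩
    intro p q hp hpq hq
    exact hout p q hp hpq hq (by omega)

-- B: shape facts -----------------------------------------------------------------

theorem alt_inner_mono (h : List Int) :
    ∀ (a i : Int), a ≤ (PySem.List.pyRange (i + 1) (h.length : Int) 1).foldl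
      (fun best j => max best (candy h i j)) a :=
  fun a i => foldl_init_le _ (fun a' x => le_max_left a' (candy h i x)) _ a

theorem alt_nonneg (h : List Int) (n : Int) : 0 ≤ maxCandy_alt h n :=
  foldl_init_le _ (alt_inner_mono h) _ 0

theorem alt_le (h : List Int) (n K : Int) (hK : 0 ≤ K)
    (hp : ∀ p q, 0 ≤ p → p < q → q ≤ (h.length : Int) - 1 → candy h p q ≤ K) :
    maxCandy_alt h n ≤ K := by
  unfold maxCandy_alt
  refine foldl_le _ K _ ?_ 0 hK
  intro a i ha hi
  have hi' := (PySem.List.mem_pyRange_one).1 hi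
  refine foldl_le _ K _ ?_ a ha
  intro a' j ha' hj
  have hj' := (PySem.List.mem_pyRange_one).1 hj
  exact max_le ha' (hp i j (by omega) (by omega) (by omega))

theorem alt_ge (h : List Int) (n : Int) :
    ∀ p q, 0 ≤ p → p < q → q ≤ (h.length : Int) - 1 → candy h p q ≤ maxCandy_alt h n := by
  intro p q hp hpq hq
  unfold maxCandy_alt
  refine foldl_mem_le _ (alt_inner_mono h) (candy h p q) p _ ?_ ?_ 0
  · exact (PySem.List.mem_pyRange_one).2 ⟨hp, by omega⟩
  · intro a
    refine foldl_mem_le _ (fun a' x => le_max_left a' (candy h p x)) (candy h p q) q _ ?_ ?_ a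
    · exact (PySem.List.mem_pyRange_one).2 ⟨by omega, by omega⟩
    · intro a'; exact le_max_right a' (candy h p q)

-- ===== VERDICT (by name: the statement is the Claim_ definition above) =====
theorem maxCandy_spec : Claim_equal_maxCandy := by
  intro height n _
  unfold Spec_maxCandy maxCandy
  have hA := loopA_ge height 0 ((height.length : Int) - 1) 0 le_rfl
    (fun p q hp hpq hq hnot => absurd ⟨hp, hq⟩ hnot)
  apply le_antisymm
  · exact loopA_le height _ 0 _ 0 (alt_nonneg height n)
      (fun p q h1 h2 h3 => alt_ge height n p q h1 h2 h3)
  · exact alt_le height n _ hA.1 hA.2
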